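-- pv_equiv track=rewrite | github.com/Rizato/aoc-2025-solutions | aoc25/two/solution.py | is_id_valid_part_two
-- ===== SOURCE A (Python) =====
-- def is_id_valid_part_two(product_id: int) -> bool:
--     # Now test if the number has some number of repeating patterns
--     # Two pointer solution in one pass
--     repeat_pointer = 0
--     current_pointer = 1
--     # We could do this without converting to a string...
--
--     pid = product_id
--     p = list()
--     while pid > 0:
--         p.insert(0, pid % 10)
--         pid //= 10
--
--     while current_pointer < len(p):
--         # Rest when they don't match
--         # This handles things like 11121112, so it will reset back to the start, even when matching numbers within a pattern
--         if p[current_pointer] == p[repeat_pointer]: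
--             repeat_pointer += 1
--         elif p[current_pointer] == p[0]:
--             # If it matches the starting position, start over but with a match already
--             repeat_pointer = 1
--         else:
--             repeat_pointer = 0
--
--         current_pointer += 1
--
--     # Now, we have a repeat pointer and current pointer
--     # repeater pointer is a multiple of the difference, then it matched
--     # Also have to check 0 to make sure it found any match at all
--     diff = current_pointer - repeat_pointer
--     return repeat_pointer == 0 or repeat_pointer % diff != 0
-- ===== SOURCE B (Python) =====
-- def is_id_valid_part_two(product_id: int) -> bool:
--     # Anchor-skip reformulation of the greedy repeat scan: instead of a
--     # per-digit three-branch state machine, jump between candidate anchors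
--     # (occurrences of the first digit) and match runs against the prefix.
--     if product_id <= 0:
--         return True
--     s = str(product_id)
--     L = len(s)
--     a = 1
--     while a < L:
--         if s[a] != s[0]:
--             a += 1  # not a candidate anchor
--             continue
--         m = a + 1
--         while m < L and s[m] == s[m - a]:
--             m += 1
--         if m == L:
--             # matched to the end: greedy repeat length is L - a
--             return L % a != 0
--         a = m  # resume the anchor search at the mismatch position
--     return True
-- ===== Notes on version B (the rewrite author's own statement) =====
-- stated objective: alternative
-- what changed: A's single-pass three-branch greedy state machine over a digit list built by repeated modulo/floor-division is replaced by an anchor-skip scan over the decimal string: jump between occurrences of the first character, match each candidate anchor against the prefix with an inner run, and decide via a length-divisibility test on the surviving anchor.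
import Mathlib
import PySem

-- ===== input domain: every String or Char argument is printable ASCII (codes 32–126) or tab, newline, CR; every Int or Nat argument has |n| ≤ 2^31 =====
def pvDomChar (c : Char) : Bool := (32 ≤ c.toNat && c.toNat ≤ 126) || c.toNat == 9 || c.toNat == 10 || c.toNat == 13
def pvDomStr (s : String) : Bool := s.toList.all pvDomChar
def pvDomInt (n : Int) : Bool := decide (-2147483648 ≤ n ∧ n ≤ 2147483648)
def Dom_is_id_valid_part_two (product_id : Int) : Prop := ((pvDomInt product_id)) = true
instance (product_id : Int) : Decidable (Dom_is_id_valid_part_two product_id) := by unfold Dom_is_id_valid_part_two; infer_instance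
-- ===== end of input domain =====

-- B restructures A's per-digit three-branch greedy state machine into an anchor-skip
-- two-level scan over the decimal string (objective: alternative, same result).

-- ===== PORT A =====
-- while pid > 0: p.insert(0, pid % 10); pid //= 10
def pvDigitsLoop (pid : Int) (p : List Int) : List Int :=
  if 0 < pid then pvDigitsLoop (PySem.Int.floordiv pid 10) (PySem.Int.mod pid 10 :: p) else p
  termination_by pid.toNat
  decreasing_by rw [PySem.Int.floordiv_eq_ediv_of_pos (by norm_num)]; omega

-- the while loop over current_pointer; returns (repeat_pointer, current_pointer) at exit.
-- p[i] is always in range here (Python would raise otherwise), so pyGetD is exact.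
def pvALoop (p : List Int) (repeatPtr currentPtr : Int) : Int × Int :=
  if currentPtr < (p.length : Int) then
    pvALoop p
      (if PySem.List.pyGetD p currentPtr 0 = PySem.List.pyGetD p repeatPtr 0 then repeatPtr + 1
       else if PySem.List.pyGetD p currentPtr 0 = PySem.List.pyGetD p 0 0 then 1 else 0)
      (currentPtr + 1)
  else (repeatPtr, currentPtr)
  termination_by ((p.length : Int) - currentPtr).toNat
  decreasing_by omega

def is_id_valid_part_two (product_id : Int) : Bool :=
  let p := pvDigitsLoop product_id []
  let rc := pvALoop p 0 1
  decide (rc.1 = 0) || decide (PySem.Int.mod rc.1 (rc.2 - rc.1) ≠ 0)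

-- ===== PORT B =====
-- inner while: first m' ≥ m with m' = len(s) or s[m'] != s[m' - a]; indices in range, so getD is exact
def pvAltMismatch (s : List Char) (a m : Nat) : Nat :=
  if m < s.length then
    if s.getD m 'x' = s.getD (m - a) 'x' then pvAltMismatch s a (m + 1) else m
  else m
  termination_by s.length - m

-- needed by pvAltLoop's termination
theorem pvAltMismatch_ge (s : List Char) (a m : Nat) : m ≤ pvAltMismatch s a m := by
  fun_induction pvAltMismatch s a m with
  | case1 _ _ ih => omega
  | case2 => omega
  | case3 => omega

-- outer while over the anchor a
def pvAltLoop (s : List Char) (a : Nat) : Bool :=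
  if a < s.length then
    if s.getD a 'x' ≠ s.getD 0 'x' then pvAltLoop s (a + 1)
    else
      if pvAltMismatch s a (a + 1) = s.length then decide (s.length % a ≠ 0)
      else pvAltLoop s (pvAltMismatch s a (a + 1))
  else true
  termination_by s.length - a
  decreasing_by
  · omega
  · have := pvAltMismatch_ge s a (a + 1); omega

def is_id_valid_part_two_alt (product_id : Int) : Bool :=
  if product_id ≤ 0 then true
  else pvAltLoop (PySem.Int.toChars product_id) 1

-- ===== PRECONDITION & SPEC =====
def Spec_is_id_valid_part_two (product_id : Int) (out : Bool) : Prop := out = is_id_valid_part_two_alt product_id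
instance (product_id : Int) (out : Bool) : Decidable (Spec_is_id_valid_part_two product_id out) := by unfold Spec_is_id_valid_part_two; infer_instance

-- ===== CLAIM (what is proved, stated in full; the proofs are below) =====
def Claim_equal_is_id_valid_part_two : Prop := ∀ (product_id : Int), Dom_is_id_valid_part_two product_id → Spec_is_id_valid_part_two product_id (is_id_valid_part_two product_id)

-- ===== LEMMAS AND PROOFS =====

-- Nat-level mirror of A's scan over the digit list D (most-significant first)
def aLoopN (D : List Nat) (r c : Nat) : Nat :=
  if c < D.length then
    aLoopN D (if D.getD c 0 = D.getD r 0 then r + 1 else if D.getD c 0 = D.getD 0 0 then 1 else 0) (c + 1)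
  else r
  termination_by D.length - c

-- A's final boolean, starting the scan at position c with state r
def AresN (D : List Nat) (c r : Nat) : Bool :=
  decide (aLoopN D r c = 0) || decide (aLoopN D r c % (max c D.length - aLoopN D r c) ≠ 0)

-- Nat-level mirrors of B's two loops
def altMismatchN (D : List Nat) (a m : Nat) : Nat :=
  if m < D.length then
    if D.getD m 0 = D.getD (m - a) 0 then altMismatchN D a (m + 1) else m
  else m
  termination_by D.length - m

theorem altMismatchN_ge (D : List Nat) (a m : Nat) : m ≤ altMismatchN D a m := by
  fun_induction altMismatchN D a m with
  | case1 _ _ ih => omega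
  | case2 => omega
  | case3 => omega

def altLoopN (D : List Nat) (a : Nat) : Bool :=
  if a < D.length then
    if D.getD a 0 ≠ D.getD 0 0 then altLoopN D (a + 1)
    else
      if altMismatchN D a (a + 1) = D.length then decide (D.length % a ≠ 0)
      else altLoopN D (altMismatchN D a (a + 1))
  else true
  termination_by D.length - a
  decreasing_by
  · omega
  · have := altMismatchN_ge D a (a + 1); omega

-- digit extraction bridge: A's %10 loop produces the reversed Nat.digits, cast to Int
theorem digitsLoop_eq (m : Nat) (acc : List Int) :
    pvDigitsLoop (m : Int) acc = ((Nat.digits 10 m).reverse.map (fun d : Nat => (d : Int))) ++ acc := by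
  induction m using Nat.strong_induction_on generalizing acc with
  | _ m ih =>
    by_cases hm : 0 < m
    · rw [pvDigitsLoop]
      have h10 : (10 : Int) = ((10 : Nat) : Int) := rfl
      rw [if_pos (by exact_mod_cast hm), h10, PySem.Int.floordiv_natCast, PySem.Int.mod_natCast]
      rw [ih (m / 10) (Nat.div_lt_self hm (by norm_num))]
      rw [Nat.digits_def' (by norm_num) hm]
      simp
    · have : m = 0 := by omega
      subst this
      rw [pvDigitsLoop]
      simp

theorem getD_map_cast (D : List Nat) (k : Nat) :
    (D.map (fun d : Nat => (d : Int))).getD k 0 = ((D.getD k 0 : Nat) : Int) := by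
  rw [List.getD_eq_getElem?_getD, List.getD_eq_getElem?_getD, List.getElem?_map]
  cases D[k]? <;> simp

-- A's loop bridge: pvALoop on the cast list computes aLoopN and ends at max c L
theorem aLoop_bridge (D : List Nat) (r c : Nat) :
    pvALoop (D.map (fun d : Nat => (d : Int))) (r : Int) (c : Int) =
      ((aLoopN D r c : Int), ((max c D.length : Nat) : Int)) := by
  fun_induction aLoopN D r c with
  | case1 r c hlt ih =>
    rw [pvALoop, if_pos (show ((c : Int)) < ((D.map (fun d : Nat => (d : Int))).length : Int) by
          rw [List.length_map]; exact_mod_cast hlt)]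
    rw [PySem.List.pyGetD_natCast, PySem.List.pyGetD_natCast, PySem.List.pyGetD_ofNat',
        getD_map_cast, getD_map_cast, getD_map_cast]
    have hmx : max c D.length = max (c + 1) D.length := by omega
    rw [hmx]
    rw [show ((c : Int) + 1) = (((c + 1 : Nat)) : Int) by push_cast; ring]
    rw [show (if ((D.getD c 0 : Nat) : Int) = ((D.getD r 0 : Nat) : Int) then (r : Int) + 1
             else if ((D.getD c 0 : Nat) : Int) = ((D.getD 0 0 : Nat) : Int) then (1 : Int) else 0)
          = (((if D.getD c 0 = D.getD r 0 then r + 1 else if D.getD c 0 = D.getD 0 0 then 1 else 0 : Nat)) : Int) by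
        simp only [Nat.cast_inj]; split_ifs <;> push_cast <;> ring]
    exact ih
  | case2 r c hge =>
    rw [pvALoop, if_neg (show ¬ ((c : Int)) < ((D.map (fun d : Nat => (d : Int))).length : Int) by
          rw [List.length_map]; exact_mod_cast hge)]
    have : max c D.length = c := by omega
    rw [this]

theorem aLoopN_lt (D : List Nat) (r c : Nat) : r < c → aLoopN D r c < max c D.length := by
  fun_induction aLoopN D r c with
  | case1 r c hlt ih =>
    intro _
    have h2 := ih (by split_ifs <;> omega)
    simp only [dite_eq_ite] at h2 ⊢
    omega
  | case2 r c hge => intro h; omega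

-- digitChar is injective on digits
theorem digitChar_inj : ∀ x < 10, ∀ y < 10, Nat.digitChar x = Nat.digitChar y → x = y := by decide

theorem getD_map_char (D : List Nat) (k : Nat) (h : k < D.length) :
    (D.map Nat.digitChar).getD k 'x' = Nat.digitChar (D.getD k 0) := by
  rw [List.getD_eq_getElem?_getD, List.getD_eq_getElem?_getD, List.getElem?_map,
      List.getElem?_eq_getElem h]
  simp

theorem getD_mem_lt (D : List Nat) (hD : ∀ x ∈ D, x < 10) (k : Nat) (h : k < D.length) :
    D.getD k 0 < 10 := by
  have : D.getD k 0 = D[k] := by rw [List.getD_eq_getElem?_getD, List.getElem?_eq_getElem h]; rfl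
  rw [this]; exact hD _ (List.getElem_mem h)

theorem mismatchN_bridge (D : List Nat) (hD : ∀ x ∈ D, x < 10) (a m : Nat) :
    pvAltMismatch (D.map Nat.digitChar) a m = altMismatchN D a m := by
  fun_induction altMismatchN D a m with
  | case1 m hlt heq ih =>
    rw [pvAltMismatch, if_pos (by rw [List.length_map]; exact hlt),
        if_pos (by rw [getD_map_char D m hlt, getD_map_char D (m - a) (by omega)]; exact congrArg _ heq)]
    exact ih
  | case2 m hlt hne =>
    rw [pvAltMismatch, if_pos (by rw [List.length_map]; exact hlt),
        if_neg (by
          rw [getD_map_char D m hlt, getD_map_char D (m - a) (by omega)]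
          intro hch
          exact hne (digitChar_inj _ (getD_mem_lt D hD m hlt) _ (getD_mem_lt D hD (m - a) (by omega)) hch))]
  | case3 m hge =>
    rw [pvAltMismatch, if_neg (by rw [List.length_map]; exact hge)]

theorem loopN_bridge (D : List Nat) (hD : ∀ x ∈ D, x < 10) (a : Nat) :
    pvAltLoop (D.map Nat.digitChar) a = altLoopN D a := by
  fun_induction altLoopN D a with
  | case1 a hlt hne ih =>
    rw [pvAltLoop, if_pos (by rw [List.length_map]; exact hlt),
        if_pos (by
          rw [getD_map_char D a hlt, getD_map_char D 0 (by omega)]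
          intro hch
          exact hne (digitChar_inj _ (getD_mem_lt D hD a hlt) _ (getD_mem_lt D hD 0 (by omega)) hch))]
    exact ih
  | case2 a hlt heq hstop =>
    rw [pvAltLoop, if_pos (by rw [List.length_map]; exact hlt),
        if_neg (by
          rw [getD_map_char D a hlt, getD_map_char D 0 (by omega)]
          exact not_not_intro (congrArg _ (not_not.mp heq))),
        mismatchN_bridge D hD, List.length_map, if_pos hstop]
  | case3 a hlt heq hstop ih =>
    rw [pvAltLoop, if_pos (by rw [List.length_map]; exact hlt),
        if_neg (by
          rw [getD_map_char D a hlt, getD_map_char D 0 (by omega)]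
          exact not_not_intro (congrArg _ (not_not.mp heq))),
        mismatchN_bridge D hD, List.length_map, if_neg hstop]
    exact ih
  | case4 a hge =>
    rw [pvAltLoop, if_neg (by rw [List.length_map]; exact hge)]

theorem toDigitsCore_eq (m : Nat) :
    ∀ (fuel : Nat) (acc : List Char), 0 < m → m < fuel →
      Nat.toDigitsCore 10 fuel m acc = ((Nat.digits 10 m).map Nat.digitChar).reverse ++ acc := by
  induction m using Nat.strong_induction_on with
  | _ m ih =>
    intro fuel acc hm hfuel
    match fuel with
    | 0 => omega
    | f + 1 =>
      rw [Nat.toDigitsCore]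
      by_cases h0 : m / 10 = 0
      · rw [if_pos h0]
        have hlt : m < 10 := by omega
        rw [Nat.digits_def' (by norm_num) hm, h0, Nat.digits_zero, Nat.mod_eq_of_lt hlt]
        simp
      · rw [if_neg h0]
        rw [ih (m / 10) (Nat.div_lt_self hm (by norm_num)) f (Nat.digitChar (m % 10) :: acc)
              (Nat.pos_of_ne_zero h0) (by omega)]
        rw [Nat.digits_def' (by norm_num) hm]
        simp

theorem toChars_pos (n : Int) (h : 0 < n) :
    PySem.Int.toChars n = (Nat.digits 10 n.toNat).reverse.map Nat.digitChar := by
  rw [PySem.Int.toChars, if_neg (by omega), Nat.toDigits]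
  rw [toDigitsCore_eq n.toNat (n.toNat + 1) [] (by omega) (by omega)]
  rw [List.append_nil, List.map_reverse]

theorem aLoopN_stop (D : List Nat) (r c : Nat) (h : ¬ c < D.length) : aLoopN D r c = r := by
  rw [aLoopN, if_neg h]

theorem aLoopN_step (D : List Nat) (r c : Nat) (h : c < D.length) :
    aLoopN D r c = aLoopN D (if D.getD c 0 = D.getD r 0 then r + 1 else if D.getD c 0 = D.getD 0 0 then 1 else 0) (c + 1) := by
  conv_lhs => rw [aLoopN, if_pos h]

theorem AresN_step (D : List Nat) (r c : Nat) (h : c < D.length) :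
    AresN D c r = AresN D (c + 1) (if D.getD c 0 = D.getD r 0 then r + 1 else if D.getD c 0 = D.getD 0 0 then 1 else 0) := by
  unfold AresN
  rw [aLoopN_step D r c h, (show max c D.length = max (c + 1) D.length by omega)]

-- the simulation: A's greedy state machine against B's anchor-skip scan, both modes at once
theorem simN (D : List Nat) (n : Nat) :
    (∀ c, 1 ≤ c → D.length ≤ c + n → AresN D c 0 = altLoopN D c) ∧
    (∀ a m, 1 ≤ a → a < m → m ≤ D.length → D.length ≤ m + n →
      AresN D m (m - a) =
        (if altMismatchN D a m = D.length then decide (D.length % a ≠ 0)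
         else altLoopN D (altMismatchN D a m))) := by
  induction n with
  | zero =>
    constructor
    · intro c _ hlen
      unfold AresN
      rw [aLoopN_stop D 0 c (by omega)]
      conv_rhs => rw [altLoopN, if_neg (show ¬ c < D.length by omega)]
      simp
    · intro a m ha ham hmL hbound
      have hm : m = D.length := by omega
      subst hm
      unfold AresN
      rw [aLoopN_stop D _ _ (by omega)]
      conv_rhs => rw [altMismatchN, if_neg (show ¬ D.length < D.length by omega)]
      rw [if_pos rfl]
      have hsub : D.length - a + a = D.length := by omega
      have hmod : (D.length - a) % a = D.length % a := by
        conv_rhs => rw [← hsub]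
        rw [Nat.add_mod_right]
      have hne : ¬ (D.length - a = 0) := by omega
      rw [(show max D.length D.length = D.length by omega),
          (show D.length - (D.length - a) = a by omega), hmod]
      simp [hne]
  | succ n ih =>
    constructor
    · intro c hc hlen
      by_cases hcL : c < D.length
      · rw [AresN_step D 0 c hcL]
        have hcol : (if D.getD c 0 = D.getD 0 0 then 0 + 1 else if D.getD c 0 = D.getD 0 0 then 1 else 0)
            = (if D.getD c 0 = D.getD 0 0 then 1 else 0) := by split_ifs <;> rfl
        rw [hcol]
        by_cases heq : D.getD c 0 = D.getD 0 0
        · rw [if_pos heq]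
          have h1 := ih.2 c (c + 1) hc (by omega) (by omega) (by omega)
          rw [show c + 1 - c = 1 by omega] at h1
          rw [h1]
          conv_rhs => rw [altLoopN, if_pos hcL, if_neg (not_not_intro heq)]
        · rw [if_neg heq]
          rw [ih.1 (c + 1) (by omega) (by omega)]
          conv_rhs => rw [altLoopN, if_pos hcL, if_pos heq]
      · exact ih.1 c hc (by omega)
    · intro a m ha ham hmL hbound
      by_cases hm : m < D.length
      · rw [AresN_step D (m - a) m hm, (show m - a + 1 = m + 1 - a by omega)]
        by_cases h1 : D.getD m 0 = D.getD (m - a) 0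
        · rw [if_pos h1]
          rw [ih.2 a (m + 1) ha (by omega) (by omega) (by omega)]
          have hmm : altMismatchN D a m = altMismatchN D a (m + 1) := by
            conv_lhs => rw [altMismatchN, if_pos hm, if_pos h1]
          rw [hmm]
        · rw [if_neg h1]
          have hmm : altMismatchN D a m = m := by
            conv_lhs => rw [altMismatchN, if_pos hm, if_neg h1]
          rw [hmm, if_neg (show ¬ m = D.length by omega)]
          by_cases h2 : D.getD m 0 = D.getD 0 0
          · rw [if_pos h2]
            have h3 := ih.2 m (m + 1) (by omega) (by omega) (by omega) (by omega)
            rw [show m + 1 - m = 1 by omega] at h3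
            rw [h3]
            conv_rhs => rw [altLoopN, if_pos hm, if_neg (not_not_intro h2)]
          · rw [if_neg h2]
            rw [ih.1 (m + 1) (by omega) (by omega)]
            conv_rhs => rw [altLoopN, if_pos hm, if_pos h2]
      · exact ih.2 a m ha ham hmL (by omega)

-- ===== VERDICT (by name: the statement is the Claim_ definition above) =====
theorem is_id_valid_part_two_spec : Claim_equal_is_id_valid_part_two := by
  intro product_id _
  unfold Spec_is_id_valid_part_two
  have hshape : is_id_valid_part_two product_id =
      (decide ((pvALoop (pvDigitsLoop product_id []) 0 1).1 = 0) ||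
       decide (PySem.Int.mod (pvALoop (pvDigitsLoop product_id []) 0 1).1
         ((pvALoop (pvDigitsLoop product_id []) 0 1).2 - (pvALoop (pvDigitsLoop product_id []) 0 1).1) ≠ 0)) := rfl
  by_cases hn : product_id ≤ 0
  · rw [hshape, pvDigitsLoop, if_neg (by omega), pvALoop, if_neg (by norm_num)]
    unfold is_id_valid_part_two_alt
    rw [if_pos hn]
    simp
  · replace hn : 0 < product_id := by omega
    have hm0 : product_id.toNat ≠ 0 := by omega
    set D : List Nat := (Nat.digits 10 product_id.toNat).reverse with hD
    have hDlen : 1 ≤ D.length := by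
      rw [hD, List.length_reverse]
      exact List.length_pos_of_ne_nil (Nat.digits_ne_nil_iff_ne_zero.mpr hm0)
    have hdig : ∀ x ∈ D, x < 10 := by
      intro x hx
      rw [hD, List.mem_reverse] at hx
      exact Nat.digits_lt_base (by norm_num) hx
    have hp : pvDigitsLoop product_id [] = List.map (fun d : Nat => (d : Int)) D := by
      rw [show product_id = ((product_id.toNat : Nat) : Int) by omega,
          digitsLoop_eq product_id.toNat [], List.append_nil, ← hD]
    have hA : is_id_valid_part_two product_id = AresN D 1 0 := by
      rw [hshape, hp]
      have hb := aLoop_bridge D 0 1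
      simp only [Nat.cast_zero, Nat.cast_one] at hb
      rw [hb]
      have hlt := aLoopN_lt D 0 1 (by norm_num)
      have hsub : ((max 1 D.length : Nat) : Int) - ((aLoopN D 0 1 : Nat) : Int)
          = (((max 1 D.length - aLoopN D 0 1 : Nat)) : Int) := by omega
      simp only []
      rw [hsub, PySem.Int.mod_natCast]
      unfold AresN
      simp only [ne_eq, Nat.cast_eq_zero]
    have hB : is_id_valid_part_two_alt product_id = altLoopN D 1 := by
      unfold is_id_valid_part_two_alt
      rw [if_neg (by omega), toChars_pos product_id hn, ← hD]
      exact loopN_bridge D hdig 1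
    rw [hA, hB]
    exact (simN D D.length).1 1 (le_refl 1) (by omega)
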